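-- pv_equiv track=rewrite | github.com/B-UMMI/Schema_Refinery | SchemaRefinery/utils/kmers_functions.py | kmer_coverage
-- ===== SOURCE A (Python) =====
-- def kmer_coverage(position: list, window_size: int) -> int:
--     """
--     Determines the sum size of kmers for coverage calculation
--
--     Parameters
--     ----------
--     position : list
--         List with starting positions sorted from initial to last.
--     window_size : int
--         Size of each minimizers window.
--
--     Returns
--     -------
--     size : int
--         Total sum of the kmers size based on starting position.
--     """
--
--     size: int = 0
--     len_positions: int = len(position)-1
--     for i, pos in enumerate(position):
--         if i == 0:
--             start = pos
--             end = pos+window_size-1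
--         elif pos <= end:
--             end = pos+window_size-1
--         else:
--             size += end-start+1
--             start = pos
--             end = pos+window_size-1
--
--         if i == len_positions:
--             end = pos+window_size-1
--             size += end-start+1
--     return size
-- ===== SOURCE B (Python) =====
-- def kmer_coverage(position: list, window_size: int) -> int:
--     """Merged-window coverage computed as a sum over consecutive-position gaps."""
--     if not position:
--         return 0
--     return sum(min(window_size, b - a) for a, b in zip(position, position[1:])) + window_size
-- ===== Notes on version B (the rewrite author's own statement) =====
-- stated objective: simpler
-- what changed: Replaces the stateful interval-merging loop (running start/end boundaries flushed at breaks, plus a special last-element branch) with a closed gap-sum formula: sum of min(window_size, gap) over consecutive position pairs plus one final window_size.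
import Mathlib
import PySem

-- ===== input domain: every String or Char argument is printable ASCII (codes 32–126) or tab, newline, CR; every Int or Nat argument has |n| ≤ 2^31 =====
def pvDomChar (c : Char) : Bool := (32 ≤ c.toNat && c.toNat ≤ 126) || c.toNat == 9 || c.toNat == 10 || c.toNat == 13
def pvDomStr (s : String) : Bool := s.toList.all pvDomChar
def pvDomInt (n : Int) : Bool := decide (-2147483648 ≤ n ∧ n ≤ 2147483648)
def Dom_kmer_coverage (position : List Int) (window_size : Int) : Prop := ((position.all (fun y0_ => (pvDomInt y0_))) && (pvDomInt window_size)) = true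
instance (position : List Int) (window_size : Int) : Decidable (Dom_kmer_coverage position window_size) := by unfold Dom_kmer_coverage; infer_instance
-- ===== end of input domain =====

-- B replaces A's stateful interval-merging loop by a gap-sum formula; objective: simpler.

-- ===== PORT A =====
-- loop body of A's for-loop: state (size, start, end), item (i, pos)
def stepA (w len_positions : Int) (st : Int × Int × Int) (ip : Int × Int) : Int × Int × Int :=
  let size := st.1
  let start := st.2.1
  let endv := st.2.2
  let i := ip.1
  let pos := ip.2
  let st1 : Int × Int × Int :=
    if i = 0 then (size, pos, pos + w - 1)
    else if pos ≤ endv then (size, start, pos + w - 1)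
    else (size + endv - start + 1, pos, pos + w - 1)
  if i = len_positions then (st1.1 + ((pos + w - 1) - st1.2.1 + 1), st1.2.1, pos + w - 1)
  else st1

def kmer_coverage (position : List Int) (window_size : Int) : Int :=
  let len_positions : Int := (position.length : Int) - 1
  ((PySem.List.enumerate position 0).foldl (stepA window_size len_positions) (0, 0, 0)).1

-- ===== PORT B =====
def kmer_coverage_alt (position : List Int) (window_size : Int) : Int :=
  match position with
  | [] => 0
  | _ :: tl =>
    (List.zip position tl).foldl (fun acc q => acc + min window_size (q.2 - q.1)) 0 + window_size

-- ===== PRECONDITION & SPEC =====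
def Spec_kmer_coverage (position : List Int) (window_size : Int) (out : Int) : Prop := out = kmer_coverage_alt position window_size
instance (position : List Int) (window_size : Int) (out : Int) : Decidable (Spec_kmer_coverage position window_size out) := by unfold Spec_kmer_coverage; infer_instance

-- ===== CLAIM (what is proved, stated in full; the proofs are below) =====
def Claim_equal_kmer_coverage : Prop := ∀ (position : List Int) (window_size : Int), Dom_kmer_coverage position window_size → Spec_kmer_coverage position window_size (kmer_coverage position window_size)

-- ===== LEMMAS AND PROOFS =====

-- A's loop after the first element, with the trailing last-element addition folded
-- into the base case.
def gA (w : Int) : Int → Int → Int → List Int → Int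
  | start, endv, size, [] => size + (endv - start + 1)
  | start, endv, size, p :: xs =>
    if p ≤ endv then gA w start (p + w - 1) size xs
    else gA w p (p + w - 1) (size + endv - start + 1) xs

lemma stepA_zero (w L : Int) (st : Int × Int × Int) (pos : Int) (hL : (0 : Int) ≠ L) :
    stepA w L st (0, pos) = (st.1, pos, pos + w - 1) := by
  simp [stepA, hL]

lemma stepA_mid (w L size start endv i pos : Int) (h0 : i ≠ 0) (hL : i ≠ L) :
    stepA w L (size, start, endv) (i, pos)
      = if pos ≤ endv then (size, start, pos + w - 1)
        else (size + endv - start + 1, pos, pos + w - 1) := by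
  simp only [stepA, if_neg h0, if_neg hL]

lemma stepA_last (w L size start endv i pos : Int) (h0 : i ≠ 0) (hL : i = L) :
    stepA w L (size, start, endv) (i, pos)
      = if pos ≤ endv then (size + (pos + w - 1) - start + 1, start, pos + w - 1)
        else ((size + endv - start + 1) + (pos + w - 1) - pos + 1, pos, pos + w - 1) := by
  simp only [stepA, if_neg h0, if_pos hL]
  split_ifs <;> simp <;> ring

lemma bridgeA (w n : Int) : ∀ (xs : List Int) (i size start endv : Int),
    xs ≠ [] → 1 ≤ i → i + (xs.length : Int) = n →
    ((PySem.List.enumerate xs i).foldl (stepA w (n - 1)) (size, start, endv)).1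
      = gA w start endv size xs := by
  intro xs
  induction xs with
  | nil => intro _ _ _ _ h; exact absurd rfl h
  | cons p xs ih =>
    intro i size start endv _ hi hlen
    cases xs with
    | nil =>
      have h1 : i + 1 = n := by simpa using hlen
      rw [PySem.List.enumerate_cons, PySem.List.enumerate_nil, List.foldl_cons, List.foldl_nil,
        stepA_last w (n - 1) size start endv i p (by omega) (by omega)]
      by_cases h : p ≤ endv
      · rw [if_pos h]; simp only [gA, if_pos h]; omega
      · rw [if_neg h]; simp only [gA, if_neg h]; omega
    | cons q ys =>
      have hlen' : (i + 1) + (((q :: ys).length : Int)) = n := by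
        simp only [List.length_cons] at hlen ⊢; push_cast at hlen ⊢; omega
      have hnl : i ≠ n - 1 := by
        simp only [List.length_cons] at hlen; push_cast at hlen; omega
      rw [PySem.List.enumerate_cons, List.foldl_cons,
        stepA_mid w (n - 1) size start endv i p (by omega) hnl]
      by_cases h : p ≤ endv
      · rw [if_pos h, ih (i + 1) size start (p + w - 1) (by simp) (by omega) hlen']
        simp only [gA, if_pos h]
      · rw [if_neg h, ih (i + 1) (size + endv - start + 1) p (p + w - 1) (by simp) (by omega) hlen']
        simp only [gA, if_neg h]

lemma gA_eq (w : Int) : ∀ (xs : List Int) (prev size start : Int),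
    gA w start (prev + w - 1) size xs
      = size + (prev - start) + w
          + ((List.zip (prev :: xs) xs).map (fun q => min w (q.2 - q.1))).sum := by
  intro xs
  induction xs with
  | nil => intro prev size start; simp only [gA, List.zip_nil_right, List.map_nil, List.sum_nil]; ring
  | cons p xs ih =>
    intro prev size start
    simp only [gA, List.zip_cons_cons, List.map_cons, List.sum_cons]
    split_ifs with h
    · rw [ih p size start, min_eq_right (by omega)]; ring
    · rw [ih p (size + (prev + w - 1) - start + 1) p, min_eq_left (by omega)]; ring

lemma foldl_min_sum (w : Int) : ∀ (l : List (Int × Int)) (a : Int),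
    l.foldl (fun acc q => acc + min w (q.2 - q.1)) a
      = a + (l.map (fun q => min w (q.2 - q.1))).sum := by
  intro l
  induction l with
  | nil => simp
  | cons x l ih => intro a; simp only [List.foldl_cons, List.map_cons, List.sum_cons, ih]; ring

-- ===== VERDICT (by name: the statement is the Claim_ definition above) =====
theorem kmer_coverage_spec : Claim_equal_kmer_coverage := by
  unfold Claim_equal_kmer_coverage
  intro position w _
  unfold Spec_kmer_coverage
  cases position with
  | nil => simp [kmer_coverage, kmer_coverage_alt, PySem.List.enumerate_nil]
  | cons p rest =>
    cases rest with
    | nil =>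
      simp [kmer_coverage, kmer_coverage_alt, stepA, PySem.List.enumerate_cons,
        PySem.List.enumerate_nil]
      omega
    | cons q ys =>
      have hn : (((p :: q :: ys).length : Int)) - 1 = (((q :: ys).length : Int)) := by
        simp only [List.length_cons]; push_cast; omega
      have h0 : (0 : Int) ≠ (((p :: q :: ys).length : Int)) - 1 := by
        simp only [List.length_cons]; push_cast; omega
      show ((PySem.List.enumerate (p :: q :: ys) 0).foldl
          (stepA w ((((p :: q :: ys).length : Int)) - 1)) (0, 0, 0)).1
        = kmer_coverage_alt (p :: q :: ys) w
      rw [PySem.List.enumerate_cons, List.foldl_cons, stepA_zero _ _ _ _ h0]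
      have hb := bridgeA w (((p :: q :: ys).length : Int)) (q :: ys) (0 + 1) 0 p (p + w - 1)
        (by simp) (by omega)
        (by simp only [List.length_cons]; push_cast; omega)
      rw [hb, gA_eq w (q :: ys) p 0 p]
      show _ = kmer_coverage_alt (p :: q :: ys) w
      simp only [kmer_coverage_alt, foldl_min_sum, List.zip_cons_cons]
      ring
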